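-- pv_equiv track=rewrite | github.com/pypi-data/pypi-mirror-402 | packages/recursive-cleaner/recursive_cleaner-0.6.1-py3-none-any.whl/recursive_cleaner/output.py | remove_imports_from_code
-- ===== SOURCE A (Python) =====
-- def remove_imports_from_code(code: str) -> str:
--     """Remove import statements from code, keeping the rest."""
--     lines = []
--     for line in code.split('\n'):
--         stripped = line.strip()
--         if not (stripped.startswith('import ') or stripped.startswith('from ')):
--             lines.append(line)
--     # Remove leading empty lines
--     while lines and not lines[0].strip():
--         lines.pop(0)
--     return '\n'.join(lines)
-- ===== SOURCE B (Python) =====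
-- def remove_imports_from_code(code: str) -> str:
--     """Remove import statements from code, keeping the rest."""
--     out = []
--     started = False
--     for line in code.split('\n'):
--         stripped = line.strip()
--         if stripped.startswith('import ') or stripped.startswith('from '):
--             continue
--         if not started and not stripped:
--             continue
--         started = True
--         out.append(line)
--     return '\n'.join(out)
-- ===== Notes on version B (the rewrite author's own statement) =====
-- stated objective: alternative
-- what changed: Single fused pass with a boolean begun-flag replaces A's two phases (build filtered list, then pop leading blank lines in a while loop).
import Mathlib
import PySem

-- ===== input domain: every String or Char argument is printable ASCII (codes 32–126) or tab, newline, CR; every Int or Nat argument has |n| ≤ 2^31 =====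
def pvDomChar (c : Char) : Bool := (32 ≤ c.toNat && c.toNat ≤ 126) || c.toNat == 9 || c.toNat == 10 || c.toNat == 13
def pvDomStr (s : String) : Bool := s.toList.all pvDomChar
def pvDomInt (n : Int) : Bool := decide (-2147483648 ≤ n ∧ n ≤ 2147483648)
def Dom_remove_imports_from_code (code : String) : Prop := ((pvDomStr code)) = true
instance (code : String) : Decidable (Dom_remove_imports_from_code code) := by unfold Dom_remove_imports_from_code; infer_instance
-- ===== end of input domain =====

-- B fuses A's two phases (filter import lines, then pop leading blank lines) into one pass with a boolean begun-flag; same cost.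

-- ===== PORT A =====
-- while lines and not lines[0].strip(): lines.pop(0)
def pvDropLeading : List String → List String
  | [] => []
  | l :: t => if PySem.Str.strip l == "" then pvDropLeading t else l :: t

def remove_imports_from_code (code : String) : String :=
  let lines := ((PySem.Str.split? code "\n").getD []).foldl (fun acc line =>
    let stripped := PySem.Str.strip line
    if !(PySem.Str.startswith stripped "import " || PySem.Str.startswith stripped "from ") then
      acc ++ [line]
    else acc) []
  PySem.Str.join "\n" (pvDropLeading lines)

-- ===== PORT B =====
def pvAltGo : List String → Bool → List String
  | [], _ => []
  | line :: rest, started =>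
    let stripped := PySem.Str.strip line
    if PySem.Str.startswith stripped "import " || PySem.Str.startswith stripped "from " then
      pvAltGo rest started
    else if !started && stripped == "" then
      pvAltGo rest started
    else
      line :: pvAltGo rest true

def remove_imports_from_code_alt (code : String) : String :=
  PySem.Str.join "\n" (pvAltGo ((PySem.Str.split? code "\n").getD []) false)

-- ===== PRECONDITION & SPEC =====
def Spec_remove_imports_from_code (code : String) (out : String) : Prop := out = remove_imports_from_code_alt code
instance (code : String) (out : String) : Decidable (Spec_remove_imports_from_code code out) := by unfold Spec_remove_imports_from_code; infer_instance

-- ===== CLAIM (what is proved, stated in full; the proofs are below) =====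
def Claim_equal_remove_imports_from_code : Prop := ∀ (code : String), Dom_remove_imports_from_code code → Spec_remove_imports_from_code code (remove_imports_from_code code)

-- ===== LEMMAS AND PROOFS =====
def pvKeep (line : String) : Bool :=
  !(PySem.Str.startswith (PySem.Str.strip line) "import " || PySem.Str.startswith (PySem.Str.strip line) "from ")

lemma pvKeep_iff (l : String) :
    (PySem.Str.startswith (PySem.Str.strip l) "import " || PySem.Str.startswith (PySem.Str.strip l) "from ") = !pvKeep l := by
  simp [pvKeep]

lemma pvAltGo_true (ls : List String) : pvAltGo ls true = ls.filter pvKeep := by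
  induction ls with
  | nil => rfl
  | cons l t ih =>
    rw [pvAltGo, pvKeep_iff, List.filter]
    cases hk : pvKeep l <;> simp [ih]

lemma pvAltGo_false (ls : List String) : pvAltGo ls false = pvDropLeading (ls.filter pvKeep) := by
  induction ls with
  | nil => rfl
  | cons l t ih =>
    rw [pvAltGo, pvKeep_iff, List.filter]
    cases hk : pvKeep l
    · simpa using ih
    · simp only [Bool.not_true, pvDropLeading]
      cases hb : (PySem.Str.strip l == "")
      · simp [pvAltGo_true]
      · simpa using ih

-- ===== VERDICT (by name: the statement is the Claim_ definition above) =====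
theorem remove_imports_from_code_spec : Claim_equal_remove_imports_from_code := by
  intro code _
  show _ = _
  unfold remove_imports_from_code remove_imports_from_code_alt
  rw [pvAltGo_false]
  have := PySem.List.foldl_append_if pvKeep (id : String → String) ((PySem.Str.split? code "\n").getD []) []
  simp only [pvKeep, id] at this
  rw [this]
  simp
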